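-- pv_equiv track=rewrite | github.com/sivakumarmanoharan/codechef_solutions | covid_run.py | covid_run
-- ===== SOURCE A (Python) =====
-- def covid_run(n,k,x,y):
--     city_arr=[]
--     city_arr.append(x)
--     next_city=(x+k)%n
--     while next_city not in city_arr:
--         if next_city not in city_arr:
--             city_arr.append(next_city)
--             x=next_city
--             next_city=(x+k)%n
--     for i in city_arr:
--         if i==y:
--             return True
--     return False
-- ===== SOURCE B (Python) =====
-- import math
--
-- def covid_run(n, k, x, y):
--     if y == x:
--         return True
--     return 0 <= y < n and (y - x) % math.gcd(k, n) == 0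
-- ===== Notes on version B (the rewrite author's own statement) =====
-- stated objective: faster
-- what changed: A simulates the +k walk mod n, building the whole cycle list with an O(len) membership scan per step and then scanning it for y; B replaces the simulation by the number-theoretic criterion: y is reachable iff y == x, or 0 <= y < n and gcd(k, n) divides y - x. Pre_ restricts to n >= 1, the natural domain for a city count: n = 0 makes A raise ZeroDivisionError, and a negative number of cities is outside the task's natural domain (A's values there are an artefact of Python's %-with-negative-modulus).
-- outside the precondition, e.g. on covid_run(0, 2, 1, 3): A raises ZeroDivisionError, B returns False; on covid_run(-5, 2, 1, -2): A returns True, B returns False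
import Mathlib
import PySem

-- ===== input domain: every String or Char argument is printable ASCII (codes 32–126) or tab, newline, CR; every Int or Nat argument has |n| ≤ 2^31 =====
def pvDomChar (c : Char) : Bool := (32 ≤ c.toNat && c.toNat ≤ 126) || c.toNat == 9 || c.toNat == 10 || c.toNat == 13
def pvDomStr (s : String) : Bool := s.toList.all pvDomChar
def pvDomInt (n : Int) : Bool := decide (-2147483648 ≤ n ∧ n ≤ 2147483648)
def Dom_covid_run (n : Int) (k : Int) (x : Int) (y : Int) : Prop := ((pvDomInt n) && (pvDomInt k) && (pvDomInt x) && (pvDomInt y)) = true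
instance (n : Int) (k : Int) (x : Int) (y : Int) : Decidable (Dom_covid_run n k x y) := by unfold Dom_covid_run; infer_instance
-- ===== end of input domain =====

-- B replaces A's O(n) orbit enumeration (build the whole +k cycle mod n, then scan it)
-- by the gcd criterion: y is reachable iff y == x, or 0 ≤ y < n and gcd(k, n) ∣ y - x.
-- Objective: faster (asymptotic).

-- ===== PORT A =====
-- while next_city not in city_arr: if next_city not in city_arr: append; step.
-- Fuel n.natAbs + 1 only makes the recursion total; the loop always stops before it runs out
-- (the appended values are distinct residues mod n, of which there are at most |n|).
def covidLoop (n : Int) (k : Int) (fuel : Nat) (arr : List Int) (next : Int) : List Int :=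
  match fuel with
  | 0 => arr
  | Nat.succ fuel =>
    if next ∈ arr then arr
    else if next ∈ arr then covidLoop n k fuel arr next   -- the redundant inner 'if' of A
    else covidLoop n k fuel (arr ++ [next]) (PySem.Int.mod (next + k) n)

def covid_run (n : Int) (k : Int) (x : Int) (y : Int) : Bool :=
  let city_arr : List Int := [] ++ [x]
  let next_city := PySem.Int.mod (x + k) n
  let final := covidLoop n k (n.natAbs + 1) city_arr next_city
  -- for i in city_arr: if i == y: return True / return False
  final.any (fun i => i == y)

-- ===== PORT B =====
def covid_run_alt (n : Int) (k : Int) (x : Int) (y : Int) : Bool :=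
  if y == x then true
  else decide (0 ≤ y ∧ y < n) && decide (PySem.Int.mod (y - x) (Int.gcd k n) = 0)

-- ===== PRECONDITION & SPEC =====
-- n is a city count, so the natural domain is n ≥ 1: at n = 0 A raises ZeroDivisionError
-- on (x+k) % n, and a negative n is outside the task's natural domain (A's values there
-- are an artefact of Python's %-with-negative-modulus), so Pre_ excludes n ≤ 0.
def Pre_covid_run (n : Int) (k : Int) (x : Int) (y : Int) : Prop := 0 < n
instance (n : Int) (k : Int) (x : Int) (y : Int) : Decidable (Pre_covid_run n k x y) := by unfold Pre_covid_run; infer_instance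
def pvWitness_covid_run : Int × Int × Int × Int := (10, 4, 3, 7)

def Spec_covid_run (n : Int) (k : Int) (x : Int) (y : Int) (out : Bool) : Prop := out = covid_run_alt n k x y
instance (n : Int) (k : Int) (x : Int) (y : Int) (out : Bool) : Decidable (Spec_covid_run n k x y out) := by unfold Spec_covid_run; infer_instance

-- ===== CLAIM (what is proved, stated in full; the proofs are below) =====
def Claim_equal_covid_run : Prop := ∀ (n : Int) (k : Int) (x : Int) (y : Int), Dom_covid_run n k x y → Pre_covid_run n k x y → Spec_covid_run n k x y (covid_run n k x y)

-- ===== LEMMAS AND PROOFS =====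

-- the t-th city visited after x (t = 0 is the first step)
def pvF (n : Int) (k : Int) (x : Int) (t : Nat) : Int := PySem.Int.mod (x + ((t : Int) + 1) * k) n

-- period of the +k walk mod n
def pvP (n : Int) (k : Int) : Nat := (n / (Int.gcd k n : Int)).natAbs

lemma pv_mod_congr (n a b : Int) (h : n ∣ a - b) : PySem.Int.mod a n = PySem.Int.mod b n := by
  obtain ⟨c, hc⟩ := h
  have hab : a = b + n * c := by linarith
  simp [PySem.Int.mod, hab, Int.add_mul_fmod_self_left]

lemma pv_dvd_sub_mod (n a : Int) : n ∣ a - PySem.Int.mod a n := by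
  refine ⟨a.fdiv n, ?_⟩
  have := Int.fmod_add_mul_fdiv a n
  simp [PySem.Int.mod]; linarith

lemma pv_dvd_of_mod_eq (n a b : Int) (h : PySem.Int.mod a n = PySem.Int.mod b n) : n ∣ a - b := by
  have h1 := pv_dvd_sub_mod n a
  have h2 := pv_dvd_sub_mod n b
  have : a - b = (a - PySem.Int.mod a n) - (b - PySem.Int.mod b n) := by rw [h]; ring
  rw [this]; exact dvd_sub h1 h2

lemma pv_mod_self (n a : Int) (hn : 0 < n) (h1 : 0 ≤ a) (h2 : a < n) : PySem.Int.mod a n = a := by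
  simpa [PySem.Int.mod] using Int.fmod_eq_of_lt h1 h2

lemma pv_gcd_pos (n k : Int) (hn : n ≠ 0) : 0 < Int.gcd k n :=
  Int.gcd_pos_iff.mpr (Or.inr hn)

lemma pv_P_pos (n k : Int) (hn : n ≠ 0) : 0 < pvP n k := by
  have hg := pv_gcd_pos n k hn
  have hd : (Int.gcd k n : Int) ∣ n := Int.gcd_dvd_right k n
  unfold pvP
  have : n / (Int.gcd k n : Int) ≠ 0 := by
    intro h
    have := Int.ediv_mul_cancel hd
    rw [h] at this; simp at this; exact hn this.symm
  omega

lemma pv_P_mul_g (n k : Int) : ((pvP n k : Int)) * (Int.gcd k n : Int) = (n.natAbs : Int) := by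
  have hd : (Int.gcd k n : Int) ∣ n := Int.gcd_dvd_right k n
  have h1 : (n / (Int.gcd k n : Int)) * (Int.gcd k n : Int) = n := Int.ediv_mul_cancel hd
  have h2 : (n / (Int.gcd k n : Int)).natAbs * ((Int.gcd k n : Int)).natAbs = n.natAbs := by
    rw [← Int.natAbs_mul, h1]
  unfold pvP
  rw [← h2]
  push_cast [Int.natAbs_natCast]
  ring

lemma pv_P_le (n k : Int) (hn : n ≠ 0) : pvP n k ≤ n.natAbs := by
  have hg := pv_gcd_pos n k hn
  have hg' : (1:Int) ≤ (Int.gcd k n : Int) := by exact_mod_cast hg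
  have hP0 : (0:Int) ≤ (pvP n k : Int) := by positivity
  have h : (pvP n k : Int) ≤ (n.natAbs : Int) := by nlinarith [pv_P_mul_g n k]
  exact_mod_cast h

-- n divides k * P
lemma pv_n_dvd_kP (n k : Int) : n ∣ k * (pvP n k : Int) := by
  obtain ⟨k', hk'⟩ : (Int.gcd k n : Int) ∣ k := Int.gcd_dvd_left k n
  have h := pv_P_mul_g n k
  have hn' : n ∣ (n.natAbs : Int) := Int.dvd_natAbs.mpr dvd_rfl
  have heq : k * (pvP n k : Int) = k' * ((pvP n k : Int) * (Int.gcd k n : Int)) := by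
    calc k * (pvP n k : Int) = ((Int.gcd k n : Int) * k') * (pvP n k : Int) := by rw [← hk']
    _ = k' * ((pvP n k : Int) * (Int.gcd k n : Int)) := by ring
  rw [heq, h]
  exact Dvd.dvd.mul_left hn' k'

-- conversely, n ∣ k * m forces P ∣ m
lemma pv_P_dvd (n k : Int) (hn : n ≠ 0) (m : Int) (h : n ∣ k * m) : (pvP n k : Int) ∣ m := by
  set g : Int := (Int.gcd k n : Int) with hgdef
  have hg : 0 < g := by rw [hgdef]; exact_mod_cast pv_gcd_pos n k hn
  have hdk : g ∣ k := Int.gcd_dvd_left k n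
  have hdn : g ∣ n := Int.gcd_dvd_right k n
  have hco : Int.gcd (k / g) (n / g) = 1 := by
    simpa [hgdef] using Int.gcd_div_gcd_div_gcd (pv_gcd_pos n k hn)
  obtain ⟨k', hk'⟩ := hdk
  obtain ⟨n', hn'⟩ := hdn
  have hk'' : k / g = k' := by rw [hk']; exact Int.mul_ediv_cancel_left _ (by omega)
  have hn'' : n / g = n' := by rw [hn']; exact Int.mul_ediv_cancel_left _ (by omega)
  have hdvd : n' ∣ k' * m := by
    obtain ⟨c, hc⟩ := h
    refine ⟨c, ?_⟩
    have heq : g * (k' * m) = g * (n' * c) := by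
      rw [← mul_assoc, ← mul_assoc, ← hk', ← hn']; exact hc
    exact mul_left_cancel₀ (by omega) heq
  have hcop : IsCoprime n' k' := by
    rw [Int.isCoprime_iff_gcd_eq_one, Int.gcd_comm]
    rw [hk'', hn''] at hco; exact hco
  have hnm : n' ∣ m := hcop.dvd_of_dvd_mul_left hdvd
  have : (pvP n k : Int) = n'.natAbs := by
    unfold pvP; rw [← hgdef, hn'']
  rw [this]
  exact (Int.natAbs_dvd).mpr hnm

-- successive values: mod (f t + k) n = f (t+1)
lemma pv_f_step (n k x : Int) (t : Nat) :
    PySem.Int.mod (pvF n k x t + k) n = pvF n k x (t + 1) := by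
  apply pv_mod_congr
  have h := pv_dvd_sub_mod n (x + ((t : Int) + 1) * k)
  have heq : pvF n k x t + k - (x + (((t + 1 : Nat) : Int) + 1) * k)
      = -((x + ((t : Int) + 1) * k) - pvF n k x t) := by
    unfold pvF; push_cast; ring
  rw [heq]
  exact dvd_neg.mpr h

-- g divides f t - x
lemma pv_g_dvd_f_sub (n k x : Int) (t : Nat) :
    (Int.gcd k n : Int) ∣ pvF n k x t - x := by
  have h := pv_dvd_sub_mod n (x + ((t : Int) + 1) * k)
  have hk : (Int.gcd k n : Int) ∣ k := Int.gcd_dvd_left k n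
  have hn : (Int.gcd k n : Int) ∣ n := Int.gcd_dvd_right k n
  have : pvF n k x t - x = ((t : Int) + 1) * k - ((x + ((t : Int) + 1) * k) - pvF n k x t) := by
    unfold pvF; ring
  rw [this]
  exact dvd_sub (Dvd.dvd.mul_left hk _) (dvd_trans hn h)

-- f values are in [0, n)
lemma pv_f_range (n k x : Int) (hn : 0 < n) (t : Nat) :
    0 ≤ pvF n k x t ∧ pvF n k x t < n :=
  ⟨PySem.Int.mod_nonneg _ hn, PySem.Int.mod_lt _ hn⟩

-- f is injective below P, as a divisibility statement
lemma pv_f_eq_imp (n k x : Int) (hn : n ≠ 0) (s t : Nat) (h : pvF n k x s = pvF n k x t) :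
    (pvP n k : Int) ∣ (t : Int) - s := by
  have hd : n ∣ (x + ((t : Int) + 1) * k) - (x + ((s : Int) + 1) * k) :=
    pv_dvd_of_mod_eq n _ _ h.symm
  have : (x + ((t : Int) + 1) * k) - (x + ((s : Int) + 1) * k) = k * ((t : Int) - s) := by ring
  rw [this] at hd
  exact pv_P_dvd n k hn _ hd

-- f m = x forces P ∣ m + 1  (x must itself be a residue then)
lemma pv_f_eq_x_imp (n k x : Int) (hn : 0 < n) (m : Nat) (h : pvF n k x m = x) :
    (pvP n k : Int) ∣ (m : Int) + 1 := by
  have hr := pv_f_range n k x hn m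
  have hx : PySem.Int.mod x n = x := by
    apply pv_mod_self n x hn
    · rw [← h]; exact hr.1
    · rw [← h]; exact hr.2
  have hd : n ∣ (x + ((m : Int) + 1) * k) - x := by
    apply pv_dvd_of_mod_eq
    unfold pvF at h; rw [h, hx]
  have : (x + ((m : Int) + 1) * k) - x = k * ((m : Int) + 1) := by ring
  rw [this] at hd
  exact pv_P_dvd n k (by omega) _ hd

lemma pv_f_period (n k x : Int) (s t : Nat) (h : (pvP n k : Int) ∣ (t : Int) - s) :
    pvF n k x s = pvF n k x t := by
  apply pv_mod_congr
  obtain ⟨c, hc⟩ := h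
  have hkP := pv_n_dvd_kP n k
  obtain ⟨q, hq⟩ := hkP
  refine ⟨-(q * c), ?_⟩
  have : (x + ((s : Int) + 1) * k) - (x + ((t : Int) + 1) * k) = -(k * ((t : Int) - s)) := by ring
  rw [this, hc]
  rw [mul_comm (pvP n k : Int) c, ← mul_assoc, mul_comm k c, mul_assoc, hq]
  ring

-- the fully built orbit list contains exactly x and the f-values below the period
lemma pv_arr_full (n k x z : Int) :
    z ∈ x :: (List.range (pvP n k)).map (pvF n k x) ↔
      (z = x ∨ ∃ t, t < pvP n k ∧ z = pvF n k x t) := by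
  simp only [List.mem_cons, List.mem_map, List.mem_range]
  constructor
  · rintro (h | ⟨a, h1, h2⟩)
    · exact Or.inl h
    · exact Or.inr ⟨a, h1, h2.symm⟩
  · rintro (h | ⟨a, h1, h2⟩)
    · exact Or.inl h
    · exact Or.inr ⟨a, h1, h2.symm⟩

-- the list at the moment the walk first returns to x (one step before a full period)
lemma pv_arr_back (n k x z : Int) (m : Nat) (hPm : m + 1 = pvP n k)
    (hfx : pvF n k x m = x) :
    z ∈ x :: (List.range m).map (pvF n k x) ↔
      (z = x ∨ ∃ t, t < pvP n k ∧ z = pvF n k x t) := by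
  simp only [List.mem_cons, List.mem_map, List.mem_range]
  constructor
  · rintro (h | ⟨a, h1, h2⟩)
    · exact Or.inl h
    · exact Or.inr ⟨a, by omega, h2.symm⟩
  · rintro (h | ⟨t, ht, hz⟩)
    · exact Or.inl h
    · by_cases htm : t < m
      · exact Or.inr ⟨t, htm, hz.symm⟩
      · have htm' : t = m := by omega
        subst htm'
        exact Or.inl (by rw [hz, hfx])

-- the main loop characterisation
lemma pv_loop_char (n k x : Int) (hn : 0 < n) :
    ∀ (fuel m : Nat), m ≤ pvP n k → pvP n k - m ≤ fuel →
    ∀ z, z ∈ covidLoop n k fuel (x :: (List.range m).map (pvF n k x)) (pvF n k x m) ↔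
      (z = x ∨ ∃ t, t < pvP n k ∧ z = pvF n k x t) := by
  intro fuel
  induction fuel with
  | zero =>
    intro m hm hf z
    have hmP : m = pvP n k := by omega
    subst hmP
    simpa [covidLoop] using pv_arr_full n k x z
  | succ fuel ih =>
    intro m hm hf z
    by_cases hcond : pvF n k x m ∈ x :: (List.range m).map (pvF n k x)
    · rw [covidLoop, if_pos hcond]
      by_cases hmP : m = pvP n k
      · subst hmP; exact pv_arr_full n k x z
      · have hmlt : m < pvP n k := by omega
        rcases List.mem_cons.mp hcond with hfx | hmem
        · -- the walk returned to x: a whole period is in the list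
          have hdvd : (pvP n k : Int) ∣ (m : Int) + 1 := pv_f_eq_x_imp n k x hn m hfx
          have hdvdN : pvP n k ∣ (m + 1) := by exact_mod_cast hdvd
          have hle : pvP n k ≤ m + 1 := Nat.le_of_dvd (by omega) hdvdN
          have hPm : m + 1 = pvP n k := by omega
          exact pv_arr_back n k x z m hPm hfx
        · -- impossible: f is injective below the period
          exfalso
          obtain ⟨i, hi, hfi⟩ := by
            simpa only [List.mem_map, List.mem_range] using hmem
          have hdvd := pv_f_eq_imp n k x (by omega) i m hfi
          have hpos : (0 : Int) < (m : Int) - i := by omega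
          have := Int.le_of_dvd hpos hdvd
          omega
    · rw [covidLoop, if_neg hcond, if_neg hcond]
      have hmlt : m < pvP n k := by
        rcases Nat.lt_or_ge m (pvP n k) with h | h
        · exact h
        · exfalso
          have hmP : m = pvP n k := by omega
          apply hcond
          have hper : pvF n k x m = pvF n k x 0 := by
            apply pv_f_period n k x m 0
            refine ⟨-1, ?_⟩
            rw [hmP]; push_cast; ring
          rw [hper]
          have h0 : (0 : Nat) ∈ List.range m := List.mem_range.mpr (by have := pv_P_pos n k (by omega); omega)
          exact List.mem_cons_of_mem _ (List.mem_map_of_mem h0)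
      have harr : (x :: (List.range m).map (pvF n k x)) ++ [pvF n k x m]
          = x :: (List.range (m + 1)).map (pvF n k x) := by
        simp [List.range_succ]
      rw [harr, pv_f_step n k x m]
      exact ih (m + 1) (by omega) (by omega) z

-- the reachability criterion
lemma pv_reach_iff (n k x y : Int) (hn : 0 < n) :
    (∃ t, t < pvP n k ∧ y = pvF n k x t) ↔
      ((0 ≤ y ∧ y < n) ∧ (Int.gcd k n : Int) ∣ y - x) := by
  constructor
  · rintro ⟨t, ht, rfl⟩
    exact ⟨pv_f_range n k x hn t, pv_g_dvd_f_sub n k x t⟩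
  · rintro ⟨⟨hy1, hy2⟩, ⟨c, hc⟩⟩
    have hbez := Int.gcd_eq_gcd_ab k n
    have hyx : y - x = k * (Int.gcdA k n * c) + n * (Int.gcdB k n * c) := by
      rw [hc, hbez]; ring
    have hPpos : (0 : Int) < (pvP n k : Int) := by exact_mod_cast pv_P_pos n k (by omega)
    have ht0a : 0 ≤ PySem.Int.mod (Int.gcdA k n * c - 1) (pvP n k : Int) :=
      PySem.Int.mod_nonneg _ hPpos
    have ht0b : PySem.Int.mod (Int.gcdA k n * c - 1) (pvP n k : Int) < (pvP n k : Int) :=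
      PySem.Int.mod_lt _ hPpos
    refine ⟨(PySem.Int.mod (Int.gcdA k n * c - 1) (pvP n k : Int)).toNat, by omega, ?_⟩
    have hT : ((PySem.Int.mod (Int.gcdA k n * c - 1) (pvP n k : Int)).toNat : Int)
        = PySem.Int.mod (Int.gcdA k n * c - 1) (pvP n k : Int) := Int.toNat_of_nonneg ht0a
    have hy : PySem.Int.mod y n = y := pv_mod_self n y hn hy1 hy2
    have hcongr : pvF n k x (PySem.Int.mod (Int.gcdA k n * c - 1) (pvP n k : Int)).toNat
        = PySem.Int.mod y n := by
      apply pv_mod_congr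
      obtain ⟨q, hq⟩ := pv_dvd_sub_mod (pvP n k : Int) (Int.gcdA k n * c - 1)
      obtain ⟨w, hw⟩ := pv_n_dvd_kP n k
      refine ⟨-(w * q) - Int.gcdB k n * c, ?_⟩
      rw [hT]
      linear_combination (-1 : Int) * hyx - k * hq - q * hw
    rw [hcongr, hy]

-- ===== VERDICT (by name: the statement is the Claim_ definition above) =====
theorem covid_run_spec : Claim_equal_covid_run := by
  intro n k x y _ hpre
  have hn : 0 < n := hpre
  unfold Spec_covid_run
  have hf0 : PySem.Int.mod (x + k) n = pvF n k x 0 := by unfold pvF; norm_num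
  have hchar := pv_loop_char n k x hn (n.natAbs + 1) 0 (Nat.zero_le _)
      (by have := pv_P_le n k (by omega); omega)
  simp only [List.range_zero, List.map_nil] at hchar
  have hL : (covid_run n k x y = true) ↔
      (y = x ∨ ∃ t, t < pvP n k ∧ y = pvF n k x t) := by
    unfold covid_run
    simp only [List.nil_append]
    rw [hf0, List.any_eq_true]
    constructor
    · rintro ⟨i, hi, hbe⟩
      have hiy : i = y := by simpa using hbe
      subst hiy
      exact (hchar i).mp hi
    · intro h
      exact ⟨y, (hchar y).mpr h, by simp⟩
  have hR : (covid_run_alt n k x y = true) ↔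
      (y = x ∨ ((0 ≤ y ∧ y < n) ∧ (Int.gcd k n : Int) ∣ y - x)) := by
    unfold covid_run_alt
    by_cases hyx : y = x
    · simp [hyx]
    · simp only [beq_iff_eq, hyx, if_false, Bool.and_eq_true, decide_eq_true_eq,
        PySem.Int.mod_eq_zero_iff_dvd, false_or]
  have hiff : (covid_run n k x y = true) ↔ (covid_run_alt n k x y = true) := by
    rw [hL, hR]
    exact or_congr Iff.rfl (pv_reach_iff n k x y hn)
  exact Bool.coe_iff_coe.mp hiff
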